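-- pv_equiv track=rewrite | github.com/AlgorithmStory/AlgorithmStudy | 기본 문제/08주차_그래프2/7569_토마토/banghyungjin_7569.py | print_answer
-- ===== SOURCE A (Python) =====
-- def print_answer(input_tomatoes):                                           # 정답 함수
--     answer = 0                                                              # 정답 0으로 초기화
--     for i in input_tomatoes:                                                # 3차원 리스트 순회
--         for j in i:                                                         # -
--             for k in j:                                                     # -
--                 if k == 0:                                                  # 안 익은 토마토가 있으면
--                     return -1                                               # -1 반환 후 메소드 종료
--                 elif k - 1 > answer:                                        # 익은 토마토이면
--                     answer = k - 1                                          # 정답을 최대값으로 갱신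
--     return answer                                                           # 정답 반환
-- ===== SOURCE B (Python) =====
-- def print_answer(input_tomatoes):
--     # Bottom-up monoid reduction: each level is summarised to a pair
--     # (zero_seen, optional_max); summaries are merged, never the raw cells.
--     def merge(a, b):
--         az, am = a
--         bz, bm = b
--         if bm is None:
--             m = am
--         elif am is None:
--             m = bm
--         else:
--             m = max(am, bm)
--         return (az or bz, m)
--
--     def summarize(items, leaf):
--         acc = (False, None)
--         for it in items:
--             acc = merge(acc, leaf(it))
--         return acc
--
--     def cell(k):
--         return (k == 0, k)
--
--     zero_seen, mx = summarize(
--         input_tomatoes,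
--         lambda plane: summarize(plane, lambda row: summarize(row, cell)))
--     if zero_seen:
--         return -1
--     if mx is None or mx <= 1:
--         return 0
--     return mx - 1
-- ===== Notes on version B (the rewrite author's own statement) =====
-- stated objective: alternative
-- what changed: Replaces A's early-return triple loop with a bottom-up monoid reduction: each row/plane/grid is reduced to a (zero_seen, optional max) summary pair and summaries are merged level by level, with the answer read off the final summary; no early exit and no running answer accumulator.
import Mathlib
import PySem

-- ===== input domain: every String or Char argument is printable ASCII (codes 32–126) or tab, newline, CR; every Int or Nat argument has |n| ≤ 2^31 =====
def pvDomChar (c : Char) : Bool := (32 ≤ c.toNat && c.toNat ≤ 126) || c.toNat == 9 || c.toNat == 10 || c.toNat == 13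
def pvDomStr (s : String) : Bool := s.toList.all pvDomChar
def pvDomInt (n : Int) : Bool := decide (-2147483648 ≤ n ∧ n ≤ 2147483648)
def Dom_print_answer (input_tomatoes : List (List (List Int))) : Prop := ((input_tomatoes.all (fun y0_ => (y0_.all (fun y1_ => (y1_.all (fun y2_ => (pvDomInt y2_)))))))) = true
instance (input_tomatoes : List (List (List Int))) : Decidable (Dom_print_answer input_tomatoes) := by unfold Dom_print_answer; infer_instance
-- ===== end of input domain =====

-- B replaces A's early-return triple loop by a bottom-up monoid reduction to (zero_seen, optional max) summaries merged level by level; same cost, different structure.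

-- ===== PORT A =====
-- the inner 'for k in j' loop; none models the early 'return -1'
def paLoopK (answer : Int) : List Int → Option Int
  | [] => some answer
  | k :: rest =>
      if k = 0 then none
      else paLoopK (if k - 1 > answer then k - 1 else answer) rest

-- the middle 'for j in i' loop
def paLoopJ (answer : Int) : List (List Int) → Option Int
  | [] => some answer
  | j :: rest =>
      match paLoopK answer j with
      | none => none
      | some a => paLoopJ a rest

-- the outer 'for i in input_tomatoes' loop
def paLoopI (answer : Int) : List (List (List Int)) → Option Int
  | [] => some answer
  | i :: rest =>
      match paLoopJ answer i with
      | none => none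
      | some a => paLoopI a rest

def print_answer (input_tomatoes : List (List (List Int))) : Int :=
  match paLoopI 0 input_tomatoes with
  | none => -1
  | some a => a

-- ===== PORT B =====
-- merge of two (zero_seen, optional max) summaries
def bMerge (a b : Bool × Option Int) : Bool × Option Int :=
  (a.1 || b.1,
   match b.2 with
   | none => a.2
   | some bm =>
       match a.2 with
       | none => some bm
       | some am => some (max am bm))

-- fold a list of leaf summaries with bMerge, starting from (False, None)
def bSum {α : Type} (items : List α) (leaf : α → Bool × Option Int) : Bool × Option Int :=
  items.foldl (fun acc it => bMerge acc (leaf it)) (false, none)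

def bCell (k : Int) : Bool × Option Int := (decide (k = 0), some k)

def print_answer_alt (input_tomatoes : List (List (List Int))) : Int :=
  let s := bSum input_tomatoes (fun plane => bSum plane (fun row => bSum row bCell))
  if s.1 then -1
  else
    match s.2 with
    | none => 0
    | some mx => if mx ≤ 1 then 0 else mx - 1

-- ===== PRECONDITION & SPEC =====
def Spec_print_answer (input_tomatoes : List (List (List Int))) (out : Int) : Prop := out = print_answer_alt input_tomatoes
instance (input_tomatoes : List (List (List Int))) (out : Int) : Decidable (Spec_print_answer input_tomatoes out) := by unfold Spec_print_answer; infer_instance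

-- ===== CLAIM (what is proved, stated in full; the proofs are below) =====
def Claim_equal_print_answer : Prop := ∀ (input_tomatoes : List (List (List Int))), Dom_print_answer input_tomatoes → Spec_print_answer input_tomatoes (print_answer input_tomatoes)

-- ===== LEMMAS AND PROOFS =====

-- A's accumulator update, as a fold over a flat list of cells
def paF (a : Int) (l : List Int) : Int :=
  l.foldl (fun a k => if k - 1 > a then k - 1 else a) a

lemma paF_cons (a k : Int) (l : List Int) :
    paF a (k :: l) = paF (if k - 1 > a then k - 1 else a) l := rfl

lemma paF_append (a : Int) (l l' : List Int) :
    paF a (l ++ l') = paF (paF a l) l' := by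
  simp [paF, List.foldl_append]

lemma paLoopK_eq (a : Int) (l : List Int) :
    paLoopK a l = if (0:Int) ∈ l then none else some (paF a l) := by
  induction l generalizing a with
  | nil => rfl
  | cons k rest ih =>
      by_cases hk : k = 0
      · simp [paLoopK, hk]
      · have hk' : (0:Int) ≠ k := fun h => hk h.symm
        simp [paLoopK, hk, ih, paF_cons, hk']

lemma paLoopJ_eq (a : Int) (p : List (List Int)) :
    paLoopJ a p = if (0:Int) ∈ p.flatten then none else some (paF a p.flatten) := by
  induction p generalizing a with
  | nil => rfl
  | cons j rest ih =>
      simp only [paLoopJ, paLoopK_eq, List.flatten_cons, List.mem_append]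
      by_cases hj : (0:Int) ∈ j
      · simp [hj]
      · simp only [hj, false_or, if_false]
        rw [ih, paF_append]

lemma paLoopI_eq (a : Int) (t : List (List (List Int))) :
    paLoopI a t = if (0:Int) ∈ (t.map List.flatten).flatten then none
                  else some (paF a (t.map List.flatten).flatten) := by
  induction t generalizing a with
  | nil => rfl
  | cons i rest ih =>
      simp only [paLoopI, paLoopJ_eq, List.map_cons, List.flatten_cons, List.mem_append]
      by_cases hi : (0:Int) ∈ i.flatten
      · simp [hi]
      · simp only [hi, false_or, if_false]
        rw [ih, paF_append]

-- the intended value of a summary over a flat list of cells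
def bSpec (l : List Int) : Bool × Option Int :=
  (decide ((0:Int) ∈ l),
   match l with
   | [] => none
   | x :: xs => some (xs.foldl max x))

lemma bMerge_assoc (a b c : Bool × Option Int) :
    bMerge (bMerge a b) c = bMerge a (bMerge b c) := by
  obtain ⟨az, am⟩ := a; obtain ⟨bz, bm⟩ := b; obtain ⟨cz, cm⟩ := c
  cases am <;> cases bm <;> cases cm <;>
    simp [bMerge, Bool.or_assoc, max_assoc]

lemma foldl_max_cons (k x : Int) (xs : List Int) :
    List.foldl max k (x :: xs) = max k (List.foldl max x xs) := by
  induction xs generalizing k x with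
  | nil => simp
  | cons y ys ih =>
      rw [List.foldl_cons, ih]
      rw [ih x y, max_assoc]

lemma bSpec_nil : bSpec [] = (false, none) := by simp [bSpec]

lemma bMerge_id_left (s : Bool × Option Int) : bMerge (false, none) s = s := by
  obtain ⟨z, m⟩ := s; cases m <;> simp [bMerge]

lemma bSpec_cons (k : Int) (l : List Int) :
    bSpec (k :: l) = bMerge (bCell k) (bSpec l) := by
  cases l with
  | nil => simp [bSpec, bCell, bMerge, eq_comm]
  | cons x xs =>
      simp only [bSpec, bCell, bMerge, List.mem_cons, Prod.mk.injEq]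
      refine ⟨?_, congrArg some (foldl_max_cons k x xs)⟩
      by_cases h : k = 0 <;> simp [h, eq_comm]

lemma bSpec_append (l l' : List Int) :
    bSpec (l ++ l') = bMerge (bSpec l) (bSpec l') := by
  induction l with
  | nil => rw [List.nil_append, bSpec_nil, bMerge_id_left]
  | cons k rest ih =>
      rw [List.cons_append, bSpec_cons, ih, bSpec_cons, bMerge_assoc]

-- generic level lemma: a bSum over leaf summaries equals the spec of the flattened cells
lemma bSum_acc {α : Type} (g : α → List Int) (leaf : α → Bool × Option Int)
    (h : ∀ x, leaf x = bSpec (g x)) (l : List α) (acc : Bool × Option Int) :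
    l.foldl (fun a it => bMerge a (leaf it)) acc = bMerge acc (bSpec (l.flatMap g)) := by
  induction l generalizing acc with
  | nil =>
      obtain ⟨z, m⟩ := acc
      cases m <;> simp [bSpec, bMerge]
  | cons x rest ih =>
      simp only [List.foldl_cons, List.flatMap_cons]
      rw [ih, h, bSpec_append, bMerge_assoc]

lemma bSum_eq {α : Type} (g : α → List Int) (leaf : α → Bool × Option Int)
    (h : ∀ x, leaf x = bSpec (g x)) (l : List α) :
    bSum l leaf = bSpec (l.flatMap g) := by
  unfold bSum
  rw [bSum_acc g leaf h l, bMerge_id_left]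

lemma bCell_spec (k : Int) : bCell k = bSpec [k] := by
  simp [bCell, bSpec, eq_comm]

lemma bSum_total (t : List (List (List Int))) :
    bSum t (fun plane => bSum plane (fun row => bSum row bCell))
      = bSpec (t.map List.flatten).flatten := by
  have hrow : ∀ row : List Int, bSum row bCell = bSpec row := by
    intro row
    have := bSum_eq (fun k : Int => [k]) bCell (fun k => bCell_spec k) row
    simpa using this
  have hplane : ∀ plane : List (List Int),
      bSum plane (fun row => bSum row bCell) = bSpec plane.flatten := by
    intro plane
    have := bSum_eq (fun row : List Int => row) (fun row => bSum row bCell) hrow plane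
    simpa [List.flatMap_def] using this
  have := bSum_eq (fun plane : List (List Int) => plane.flatten)
      (fun plane => bSum plane (fun row => bSum row bCell)) hplane t
  simpa [List.flatMap_def] using this

lemma paF_step_max (a k : Int) :
    (if k - 1 > a then k - 1 else a) = max a (k - 1) := by
  rw [max_def]; split_ifs <;> omega

lemma paF_shift (x : Int) (xs : List Int) :
    paF (x - 1) xs = xs.foldl max x - 1 := by
  induction xs generalizing x with
  | nil => rfl
  | cons k rest ih =>
      rw [paF_cons, paF_step_max, List.foldl_cons]
      have h : max (x - 1) (k - 1) = max x k - 1 := by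
        rw [max_def, max_def]; split_ifs <;> omega
      rw [h, ih]

lemma paF_max_out (a b : Int) (l : List Int) :
    paF (max a b) l = max a (paF b l) := by
  induction l generalizing b with
  | nil => rfl
  | cons k rest ih =>
      rw [paF_cons, paF_cons, paF_step_max, paF_step_max, max_assoc, ih]

lemma paF_zero_cons (x : Int) (xs : List Int) :
    paF 0 (x :: xs) = max 0 (xs.foldl max x - 1) := by
  rw [paF_cons, paF_step_max]
  calc paF (max 0 (x - 1)) xs = max 0 (paF (x - 1) xs) := paF_max_out 0 (x - 1) xs
    _ = max 0 (xs.foldl max x - 1) := by rw [paF_shift]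

-- ===== VERDICT (by name: the statement is the Claim_ definition above) =====
theorem print_answer_spec : Claim_equal_print_answer := by
  intro t _
  unfold Spec_print_answer print_answer print_answer_alt
  rw [paLoopI_eq, bSum_total]
  cases hf : (t.map List.flatten).flatten with
  | nil => simp [paF, bSpec]
  | cons x xs =>
      by_cases hz : (0:Int) ∈ x :: xs
      · simp [hz, bSpec]
      · have h0 : paF 0 (x :: xs) = max 0 (xs.foldl max x - 1) := paF_zero_cons x xs
        simp only [hz, if_false, bSpec, decide_eq_true_eq, if_false]
        rw [h0, max_def]
        split_ifs <;> omega
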